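-- pv_equiv track=rewrite | github.com/FireIceMan/GLC_framework | linguistics/English/Module/denoise.py | sep_point
-- ===== SOURCE A (Python) =====
-- def sep_point(m, n, points):
--     '''To plot, we need to separate x and y value of choose_point() or left_upper()
--     In order words, the list [[(x_1,y_1),...]_(m,n), [(x_1,y_1),...]_(m+1,n+1), ...] will become
--     px = [x_m, ..., x_(m+1), ...] and py = [y_n, ..., y_(n+1), ...] after using sep_point()
--
--     ---Input
--     1. m, n: int
--         the same as m, n in choose_point() or left_upper()
--
--     2. points: array
--         return of choose_point() or left_upper()
--         namely [[(x_1,y_1),...]_(m,n), [(x_1,y_1),...]_(m+1,n+1), ...]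
--
--
--     ---Return
--     1. px:
--         [x_m, ..., x_(m+1), ...]
--
--     2. py:
--         [y_n, ..., y_(n+1), ...]
--     '''
--
--     px = []
--     py = []
--     for i in range(5): #{m,n} ,..., {m+4, n+4}
--         if points[i] == []:
--             print ('the (%d, %d) rectangle has no point.' % (i+m, i+n))
--             continue
--         for j in points[i]:
--             px.append(j[0])
--             py.append(j[1])
--     return px, py
-- ===== SOURCE B (Python) =====
-- def sep_point(m, n, points):
--     # Recursive, back-to-front: recurse over i = 0..4, print the warning for an
--     # empty sublist, then prepend the zip-transposed coordinates of points[i]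
--     # onto the result of the recursion (A loops forward appending one point at
--     # a time to two accumulators).
--     def go(i):
--         if i == 5:
--             return [], []
--         sub = points[i]
--         if sub == []:
--             print('the (%d, %d) rectangle has no point.' % (i + m, i + n))
--             return go(i + 1)
--         xs, ys = zip(*sub)
--         px, py = go(i + 1)
--         return list(xs) + px, list(ys) + py
--     return go(0)
-- ===== Notes on version B (the rewrite author's own statement) =====
-- stated objective: alternative
-- what changed: Replaces A's forward loop with two append-accumulators by a recursion over the index that zip-transposes each sublist and prepends its coordinate lists onto the recursive result, building the output back-to-front.
import Mathlib
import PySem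

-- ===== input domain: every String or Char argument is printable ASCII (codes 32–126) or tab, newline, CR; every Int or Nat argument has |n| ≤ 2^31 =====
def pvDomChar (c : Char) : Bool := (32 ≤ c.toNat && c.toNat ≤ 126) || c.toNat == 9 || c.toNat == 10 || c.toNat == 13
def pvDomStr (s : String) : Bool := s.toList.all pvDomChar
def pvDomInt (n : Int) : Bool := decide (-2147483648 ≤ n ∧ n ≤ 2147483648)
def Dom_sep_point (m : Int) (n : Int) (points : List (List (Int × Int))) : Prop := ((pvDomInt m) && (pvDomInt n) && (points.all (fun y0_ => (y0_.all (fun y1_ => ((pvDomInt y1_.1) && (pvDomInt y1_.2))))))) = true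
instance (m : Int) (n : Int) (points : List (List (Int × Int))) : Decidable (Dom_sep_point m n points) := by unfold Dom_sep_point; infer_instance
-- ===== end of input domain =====

-- B builds the result by recursion (zip-transpose each sublist, prepend onto the recursive
-- result) instead of A's forward loop with append-accumulators; equivalence is about the
-- RETURN value only (both print the same warnings, not modelled here).

-- ===== PORT A =====
def sep_point (m : Int) (n : Int) (points : List (List (Int × Int))) : List Int × List Int :=
  -- for i in range(5): if points[i] == []: print(...); continue; for j in points[i]: px.append(j[0]); py.append(j[1])
  (PySem.List.pyRange 0 5 1).foldl (fun (acc : List Int × List Int) i =>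
    match PySem.List.pyGet? points i with
    | none => acc  -- IndexError; excluded by Pre_sep_point
    | some sub =>
      if sub = [] then acc  -- prints the warning (side effect, not modelled) and continues
      else sub.foldl (fun (acc2 : List Int × List Int) j => (acc2.1 ++ [j.1], acc2.2 ++ [j.2])) acc)
    ([], [])

-- ===== PORT B =====
-- go(i): recursion measured by the fuel 5 - i (k = 5 - i)
def sepGo (points : List (List (Int × Int))) : Nat → List Int × List Int
  | 0 => ([], [])                       -- i == 5
  | Nat.succ k =>
    match PySem.List.pyGet? points ((5 - (k+1) : Nat) : Int) with  -- sub = points[i]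
    | none => ([], [])                  -- IndexError; excluded by Pre_sep_point
    | some sub =>
      if sub = [] then sepGo points k   -- print warning (side effect), recurse
      else
        -- xs, ys = zip(*sub); px, py = go(i+1); return list(xs)+px, list(ys)+py
        let xs := sub.map Prod.fst
        let ys := sub.map Prod.snd
        let rest := sepGo points k
        (xs ++ rest.1, ys ++ rest.2)

def sep_point_alt (m : Int) (n : Int) (points : List (List (Int × Int))) : List Int × List Int :=
  sepGo points 5

-- ===== PRECONDITION & SPEC =====
-- A indexes points[0..4]; with fewer than 5 sublists Python raises IndexError.
def Pre_sep_point (m : Int) (n : Int) (points : List (List (Int × Int))) : Prop := 5 ≤ points.length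
instance (m : Int) (n : Int) (points : List (List (Int × Int))) : Decidable (Pre_sep_point m n points) := by unfold Pre_sep_point; infer_instance
def pvWitness_sep_point : Int × Int × (List (List (Int × Int))) := (2, 3, [[(1,2)], [], [(3,4),(5,6)], [(7,8)], []])

def Spec_sep_point (m : Int) (n : Int) (points : List (List (Int × Int))) (out : List Int × List Int) : Prop := out = sep_point_alt m n points
instance (m : Int) (n : Int) (points : List (List (Int × Int))) (out : List Int × List Int) : Decidable (Spec_sep_point m n points out) := by unfold Spec_sep_point; infer_instance

-- ===== CLAIM =====
def Claim_equal_sep_point : Prop := ∀ (m : Int) (n : Int) (points : List (List (Int × Int))), Dom_sep_point m n points → Pre_sep_point m n points → Spec_sep_point m n points (sep_point m n points)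

-- ===== LEMMAS AND PROOFS =====

-- A's inner loop (with its empty-sublist skip) appends the two projections of sub to the accumulator.
theorem sep_point_step (sub : List (Int × Int)) (acc : List Int × List Int) :
    (if sub = [] then acc
     else sub.foldl (fun (acc2 : List Int × List Int) j => (acc2.1 ++ [j.1], acc2.2 ++ [j.2])) acc)
    = (acc.1 ++ sub.map (fun p => p.1), acc.2 ++ sub.map (fun p => p.2)) := by
  induction sub generalizing acc with
  | nil => simp
  | cons x xs ih =>
    simp only [List.foldl_cons, if_neg (List.cons_ne_nil x xs)]
    by_cases h : xs = []
    · subst h; simp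
    · have := ih ((acc.1 ++ [x.1], acc.2 ++ [x.2]))
      rw [if_neg h] at this
      simp [this, List.append_assoc]

-- ===== VERDICT =====
theorem sep_point_spec : Claim_equal_sep_point := by
  intro m n points _ hpre
  unfold Pre_sep_point at hpre
  obtain ⟨a, b, c, d, e, rest, rfl⟩ :
      ∃ a b c d e rest, points = a :: b :: c :: d :: e :: rest := by
    match points, hpre with
    | a :: b :: c :: d :: e :: rest, _ => exact ⟨a, b, c, d, e, rest, rfl⟩
  unfold Spec_sep_point sep_point sep_point_alt
  rw [show PySem.List.pyRange 0 5 1 = [0, 1, 2, 3, 4] from rfl]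
  simp only [List.foldl_cons, List.foldl_nil]
  have h0 : PySem.List.pyGet? (a :: b :: c :: d :: e :: rest) 0 = some a := by
    rw [show (0 : Int) = ((0 : Nat) : Int) from rfl, PySem.List.pyGet?_natCast]; rfl
  have h1 : PySem.List.pyGet? (a :: b :: c :: d :: e :: rest) 1 = some b := by
    rw [show (1 : Int) = ((1 : Nat) : Int) from rfl, PySem.List.pyGet?_natCast]; rfl
  have h2 : PySem.List.pyGet? (a :: b :: c :: d :: e :: rest) 2 = some c := by
    rw [show (2 : Int) = ((2 : Nat) : Int) from rfl, PySem.List.pyGet?_natCast]; rfl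
  have h3 : PySem.List.pyGet? (a :: b :: c :: d :: e :: rest) 3 = some d := by
    rw [show (3 : Int) = ((3 : Nat) : Int) from rfl, PySem.List.pyGet?_natCast]; rfl
  have h4 : PySem.List.pyGet? (a :: b :: c :: d :: e :: rest) 4 = some e := by
    rw [show (4 : Int) = ((4 : Nat) : Int) from rfl, PySem.List.pyGet?_natCast]; rfl
  simp only [h0, h1, h2, h3, h4, sep_point_step]
  simp only [sepGo, show ((5 - (4+1) : Nat) : Int) = 0 from rfl,
    show ((5 - (3+1) : Nat) : Int) = 1 from rfl, show ((5 - (2+1) : Nat) : Int) = 2 from rfl,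
    show ((5 - (1+1) : Nat) : Int) = 3 from rfl, show ((5 - (0+1) : Nat) : Int) = 4 from rfl,
    h0, h1, h2, h3, h4]
  split_ifs <;> simp_all [List.append_assoc]
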